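-- pv_equiv track=rewrite | github.com/coandco/advent2019 | advent2019_day16.py | apply_pattern_cheat
-- ===== SOURCE A (Python) =====
-- from typing import List, Tuple, Generator
--
-- def rightmost_digit(number: int) -> int:
--     return abs(number) % 10
--
-- def chunk_gen(pattern: Tuple[int], repeats: int) -> Generator[int, None, None]:
--     starting_location = repeats - 1
--     current_location = starting_location
--     current_multiplier = 1
--     while current_location < len(pattern):
--         yield sum(pattern[current_location:current_location+repeats])*current_multiplier
--         current_location += 2*repeats
--         current_multiplier *= -1
--
-- def apply_pattern_cheat(input_signal: Tuple[int], offset: int) -> Generator[int, None, None]: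
--     num_digits = len(input_signal)
--     for _ in range(offset):
--         yield 0
--     current_multiplier = offset + 1
--     for _ in range(offset, num_digits):
--         digit = rightmost_digit(sum(chunk_gen(input_signal, current_multiplier)))
--         yield digit
--         current_multiplier += 1
-- ===== SOURCE B (Python) =====
-- def apply_pattern_cheat(input_signal, offset):
--     # prefix sums make each alternating block an O(1) difference (harmonic total)
--     n = len(input_signal)
--     pre = [0] * (n + 1)
--     for i in range(n):
--         pre[i + 1] = pre[i] + input_signal[i]
--     for _ in range(offset):
--         yield 0
--     for m in range(offset + 1, n + 1):
--         total = 0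
--         sign = 1
--         start = m - 1
--         while start < n:
--             total += sign * (pre[min(start + m, n)] - pre[start])
--             sign = -sign
--             start += 2 * m
--         yield abs(total) % 10
-- ===== Notes on version B (the rewrite author's own statement) =====
-- stated objective: faster
-- what changed: Replaces the per-output re-summation of each pattern block (sum over a slice for every chunk) by a prefix-sum array built once, so every alternating block contributes an O(1) difference of two prefix sums; total work drops from quadratic to harmonic O(n log n).
import Mathlib
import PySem

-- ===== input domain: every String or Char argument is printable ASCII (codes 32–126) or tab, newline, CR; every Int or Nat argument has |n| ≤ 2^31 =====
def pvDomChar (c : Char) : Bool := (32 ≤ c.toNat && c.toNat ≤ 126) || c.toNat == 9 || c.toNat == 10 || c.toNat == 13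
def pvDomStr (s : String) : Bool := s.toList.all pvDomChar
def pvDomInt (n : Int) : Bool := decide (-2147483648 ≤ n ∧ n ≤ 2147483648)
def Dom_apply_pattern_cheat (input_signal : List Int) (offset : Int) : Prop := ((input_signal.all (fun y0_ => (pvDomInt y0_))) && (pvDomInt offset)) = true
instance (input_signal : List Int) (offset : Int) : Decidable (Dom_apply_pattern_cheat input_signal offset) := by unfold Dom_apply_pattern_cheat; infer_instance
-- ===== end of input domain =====

-- B replaces A's per-chunk slice summation by a prefix-sum array built once, so each
-- alternating block is an O(1) difference of two prefix sums (objective: faster).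

-- ===== PORT A =====
-- rightmost_digit(number) = abs(number) % 10
def pvRightmostDigit (number : Int) : Int :=
  PySem.Int.mod (Int.ofNat number.natAbs) 10

-- chunk_gen's while loop, fuel-bounded: with repeats ≥ 1 the location advances by
-- 2*repeats ≥ 2 each turn, so fuel = len(pattern)+1 is never exhausted; for
-- repeats ≤ 0 the Python loop diverges (those inputs are outside Pre_).
def pvChunkGo (pattern : List Int) (repeats : Int) : Int → Int → Nat → List Int
  | _, _, 0 => []
  | loc, mult, fuel + 1 =>
    if loc < (pattern.length : Int) then
      (PySem.List.slice pattern (some loc) (some (loc + repeats))).sum * mult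
        :: pvChunkGo pattern repeats (loc + 2 * repeats) (-mult) fuel
    else []

def pvChunkGen (pattern : List Int) (repeats : Int) : List Int :=
  pvChunkGo pattern repeats (repeats - 1) 1 (pattern.length + 1)

def apply_pattern_cheat (input_signal : List Int) (offset : Int) : List Int :=
  ((PySem.List.pyRange 0 offset 1).map (fun _ => (0 : Int)))
    ++ ((PySem.List.pyRange offset (input_signal.length : Int) 1).foldl
        (fun (st : List Int × Int) _ =>
          (st.1 ++ [pvRightmostDigit (pvChunkGen input_signal st.2).sum], st.2 + 1))
        ([], offset + 1)).1

-- ===== PORT B =====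
-- pre[0]=0; pre[i+1] = pre[i] + input_signal[i]
def pvBuildPre (sig : List Int) : List Int :=
  (sig.foldl (fun (p : List Int × Int) d => (p.1 ++ [p.2 + d], p.2 + d)) ([(0 : Int)], 0)).1

-- B's while loop, fuel-bounded like A's
def pvAltGo (pre : List Int) (n m : Int) : Int → Int → Int → Nat → Int
  | _, _, total, 0 => total
  | start, sign, total, fuel + 1 =>
    if start < n then
      pvAltGo pre n m (start + 2 * m) (-sign)
        (total + sign * (PySem.List.pyGetD pre (min (start + m) n) 0
                          - PySem.List.pyGetD pre start 0)) fuel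
    else total

def apply_pattern_cheat_alt (input_signal : List Int) (offset : Int) : List Int :=
  ((PySem.List.pyRange 0 offset 1).map (fun _ => (0 : Int)))
    ++ (PySem.List.pyRange (offset + 1) ((input_signal.length : Int) + 1) 1).map
        (fun m =>
          PySem.Int.mod
            (Int.ofNat (pvAltGo (pvBuildPre input_signal) (input_signal.length : Int) m
                          (m - 1) 1 0 (input_signal.length + 1)).natAbs) 10)

-- ===== PRECONDITION & SPEC =====
-- Pre_ excludes only negative offsets, on which A's chunk loop never terminates
-- (step 2*repeats ≤ 0 with the location staying below the length): A returns on no input outside Pre_.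
def Pre_apply_pattern_cheat (input_signal : List Int) (offset : Int) : Prop := 0 ≤ offset
instance (input_signal : List Int) (offset : Int) : Decidable (Pre_apply_pattern_cheat input_signal offset) := by unfold Pre_apply_pattern_cheat; infer_instance

def pvWitness_apply_pattern_cheat : List Int × Int := ([1, 2, 3, 4, 5], 1)

def Spec_apply_pattern_cheat (input_signal : List Int) (offset : Int) (out : List Int) : Prop := out = apply_pattern_cheat_alt input_signal offset
instance (input_signal : List Int) (offset : Int) (out : List Int) : Decidable (Spec_apply_pattern_cheat input_signal offset out) := by unfold Spec_apply_pattern_cheat; infer_instance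

-- ===== CLAIM (what is proved, stated in full; the proofs are below) =====
def Claim_equal_apply_pattern_cheat : Prop := ∀ (input_signal : List Int) (offset : Int), Dom_apply_pattern_cheat input_signal offset → Pre_apply_pattern_cheat input_signal offset → Spec_apply_pattern_cheat input_signal offset (apply_pattern_cheat input_signal offset)

-- ===== LEMMAS AND PROOFS =====

-- the prefix array built by B's first loop is exactly [sum of first k digits | k ≤ n]
theorem pvBuildPre_pair (sig : List Int) :
    sig.foldl (fun (p : List Int × Int) d => (p.1 ++ [p.2 + d], p.2 + d)) ([(0 : Int)], 0)
      = ((List.range (sig.length + 1)).map (fun k => (sig.take k).sum), sig.sum) := by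
  induction sig using List.reverseRecOn with
  | nil => simp
  | append_singleton xs x ih =>
    rw [List.foldl_append, ih]
    simp only [List.foldl_cons, List.foldl_nil, Prod.mk.injEq]
    constructor
    · have hl : (xs ++ [x]).length + 1 = (xs.length + 1) + 1 := by simp
      rw [hl]
      conv_rhs => rw [List.range_succ, List.map_append]
      congr 1
      · apply List.map_congr_left
        intro k hk
        rw [List.mem_range] at hk
        rw [List.take_append_of_le_length (by omega)]
      · simp
    · simp

theorem pvBuildPre_spec (sig : List Int) :
    pvBuildPre sig = (List.range (sig.length + 1)).map (fun k => (sig.take k).sum) := by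
  unfold pvBuildPre; rw [pvBuildPre_pair]

theorem pvBuildPre_get (sig : List Int) (k : Int) (hk0 : 0 ≤ k) (hkn : k ≤ (sig.length : Int)) :
    PySem.List.pyGetD (pvBuildPre sig) k 0 = (sig.take k.toNat).sum := by
  rw [pvBuildPre_spec]
  have : k = ((k.toNat : Nat) : Int) := by omega
  rw [this, PySem.List.pyGetD_natCast, PySem.List.getD_map_range _ _ _ _ (by omega)]
  rw [Int.toNat_natCast]

-- sum of a clamped take equals the unclamped one
theorem pvTake_sum_clamp (sig : List Int) (j : Nat) :
    ((sig.take (min j sig.length)).sum : Int) = (sig.take j).sum := by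
  rcases le_total j sig.length with h | h
  · rw [min_eq_left h]
  · rw [min_eq_right h, List.take_length, List.take_of_length_le h]

-- the slice summed by A's chunk equals a difference of prefix sums
theorem pvSlice_sum (sig : List Int) (c m : Int) (hc : 0 ≤ c) (hm : 0 ≤ m) :
    (PySem.List.slice sig (some c) (some (c + m))).sum
      = (sig.take (c + m).toNat).sum - (sig.take c.toNat).sum := by
  rw [PySem.List.slice_toNat sig hc (by omega)]
  have hab : c.toNat ≤ (c + m).toNat := by omega
  have : sig.take (c + m).toNat = sig.take c.toNat ++ (sig.drop c.toNat).take ((c + m).toNat - c.toNat) := by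
    rw [← List.take_add, Nat.add_sub_cancel' hab]
  calc ((sig.drop c.toNat).take ((c + m).toNat - c.toNat)).sum
      = (sig.take c.toNat ++ (sig.drop c.toNat).take ((c + m).toNat - c.toNat)).sum - (sig.take c.toNat).sum := by
        rw [List.sum_append]; ring
    _ = (sig.take (c + m).toNat).sum - (sig.take c.toNat).sum := by rw [← this]

-- B's while loop computes the sum of A's chunk list
theorem pvAltGo_eq_chunkSum (sig : List Int) (m : Int) (hm : 1 ≤ m) :
    ∀ (fuel : Nat) (loc sign total : Int), 0 ≤ loc →
      pvAltGo (pvBuildPre sig) (sig.length : Int) m loc sign total fuel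
        = total + (pvChunkGo sig m loc sign fuel).sum := by
  intro fuel
  induction fuel with
  | zero => intro loc sign total _; simp [pvAltGo, pvChunkGo]
  | succ f ih =>
    intro loc sign total hloc
    by_cases h : loc < (sig.length : Int)
    · simp only [pvAltGo, pvChunkGo, if_pos h, List.sum_cons]
      rw [ih (loc + 2 * m) (-sign) _ (by omega)]
      have hmin0 : 0 ≤ min (loc + m) (sig.length : Int) := by omega
      have hminle : min (loc + m) (sig.length : Int) ≤ (sig.length : Int) := min_le_right _ _
      rw [pvBuildPre_get sig _ hmin0 hminle, pvBuildPre_get sig loc hloc (le_of_lt h)]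
      have hmin : ((min (loc + m) (sig.length : Int)).toNat) = min (loc + m).toNat sig.length := by omega
      rw [hmin, pvTake_sum_clamp, pvSlice_sum sig loc m hloc (by omega)]
      ring
    · simp only [pvAltGo, pvChunkGo, if_neg h, List.sum_nil]; ring

-- A's output fold over range(offset, n) with running multiplier, versus a map over the multipliers
theorem pvOuter (g : Int → Int) :
    ∀ (k : Nat) (a : Int) (acc : List Int),
      (((List.range k).map (fun (j : Nat) => a + (j : Int))).foldl
        (fun (st : List Int × Int) _ => (st.1 ++ [g st.2], st.2 + 1)) (acc, a + 1)).1
        = acc ++ ((List.range k).map (fun (j : Nat) => g (a + 1 + (j : Int)))) := by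
  intro k
  induction k with
  | zero => intro a acc; simp
  | succ n ih =>
    intro a acc
    rw [List.range_succ_eq_map]
    simp only [List.map_cons, List.map_map, List.foldl_cons]
    have h2 : ((List.range n).map ((fun j : Nat => a + (j : Int)) ∘ Nat.succ))
        = (List.range n).map (fun (j : Nat) => (a + 1) + (j : Int)) := by
      apply List.map_congr_left; intro j _; simp [Function.comp]; ring
    rw [h2, ih (a + 1) (acc ++ [g (a + 1)])]
    simp only [List.append_assoc, List.cons_append, List.nil_append]
    congr 1
    congr 1
    · simp
    · apply List.map_congr_left; intro j _; simp [Function.comp]; ring_nf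

-- ===== VERDICT (by name: the statement is the Claim_ definition above) =====
theorem apply_pattern_cheat_spec : Claim_equal_apply_pattern_cheat := by
  intro sig offset _ hpre
  unfold Spec_apply_pattern_cheat apply_pattern_cheat apply_pattern_cheat_alt
  congr 1
  -- body parts
  rw [PySem.List.pyRange_one offset (sig.length : Int),
      pvOuter (fun mlt => pvRightmostDigit (pvChunkGen sig mlt).sum) _ offset []]
  rw [PySem.List.pyRange_one (offset + 1) ((sig.length : Int) + 1)]
  have hlen : ((sig.length : Int) + 1 - (offset + 1)) = ((sig.length : Int) - offset) := by ring
  rw [hlen, List.nil_append, List.map_map]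
  apply List.map_congr_left
  intro j hj
  rw [List.mem_range] at hj
  have hm : (1 : Int) ≤ offset + 1 + (j : Int) := by
    have := hpre; unfold Pre_apply_pattern_cheat at this; omega
  simp only [Function.comp]
  have hkey := pvAltGo_eq_chunkSum sig (offset + 1 + (j : Int)) hm (sig.length + 1)
      (offset + 1 + (j : Int) - 1) 1 0 (by omega)
  rw [show (offset + (1 : Int) + (j : Int)) = (offset + 1 + (j : Int)) from rfl] at *
  unfold pvRightmostDigit pvChunkGen
  rw [zero_add] at hkey
  rw [hkey]
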